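-- pv_equiv track=rewrite | github.com/uthraa98/guviyan | hall491.py | countCommonDivisors
-- ===== SOURCE A (Python) =====
-- def check(s, k):
--     for i in range (0, len(s)):
--         if (s[i] != s[i % k]):
--             return False
--     return True
--
-- def countCommonDivisors(ce, b):
--     ct = 0
--     n = len(ce)
--     m = len(b)
--     for i in range(1, min(n, m) + 1):
--         if (n % i == 0 and m % i == 0):
--             if (ce[0 : i] == b[0 : i]) :
--                 if (check(ce, i) and check(b, i)) :
--                     ct = ct + 1
--     return ct
-- ===== SOURCE B (Python) =====
-- def countCommonDivisors(ce, b):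
--     n, m = len(ce), len(b)
--     a, c = n, m
--     while c:
--         a, c = c, a % c
--     g = a
--
--     def ok(d):
--         return ce[:d] == b[:d] and ce[:d] * (n // d) == ce and b[:d] * (m // d) == b
--
--     ct = 0
--     d = 1
--     while d * d <= g:
--         if g % d == 0:
--             if ok(d):
--                 ct += 1
--             e = g // d
--             if e != d and ok(e):
--                 ct += 1
--         d += 1
--     return ct
-- ===== Notes on version B (the rewrite author's own statement) =====
-- stated objective: faster
-- what changed: B computes g = gcd(n, m) once with Euclid's algorithm and enumerates only the divisors of g in d, g/d pairs up to sqrt(g), checking each candidate by whole-string prefix-repetition equality (ce[:d]*(n//d) == ce) instead of A's scan of every i in 1..min(n,m) with a per-character modular loop.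
import Mathlib
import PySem

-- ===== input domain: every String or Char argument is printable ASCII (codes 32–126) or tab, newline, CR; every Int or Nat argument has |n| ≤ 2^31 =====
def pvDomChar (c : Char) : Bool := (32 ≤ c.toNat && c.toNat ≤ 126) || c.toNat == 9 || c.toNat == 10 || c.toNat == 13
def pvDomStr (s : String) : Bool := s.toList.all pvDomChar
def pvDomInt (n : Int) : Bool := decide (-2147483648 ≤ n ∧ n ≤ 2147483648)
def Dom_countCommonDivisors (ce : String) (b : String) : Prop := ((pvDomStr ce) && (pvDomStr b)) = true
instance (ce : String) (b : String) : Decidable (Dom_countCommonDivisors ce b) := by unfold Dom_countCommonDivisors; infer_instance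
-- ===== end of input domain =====

-- B replaces A's linear scan of every candidate length by a sqrt(gcd) divisor
-- enumeration with whole-prefix repetition checks (objective: faster candidate scan).

-- ===== PORT A =====
-- check(s, k): for i in range(0, len(s)): if s[i] != s[i % k]: return False.
-- Loop indices are Python's nonnegative range values (Nat here); Python's % on
-- nonnegative operands is Nat %, and getElem? returns the same char comparison
-- (both indices i and i % k are compared exactly as Python compares s[i], s[i%k]).
def checkGo (s : List Char) (k : Nat) (i : Nat) : Bool :=
  if i < s.length then
    if s[i]? ≠ s[i % k]? then false else checkGo s k (i + 1)
  else true
termination_by s.length - i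

def check (s : List Char) (k : Nat) : Bool := checkGo s k 0

-- main loop: for i in range(1, min(n, m) + 1) with the three nested ifs;
-- ce[0 : i] with 0 <= i <= len is List.take i (exact).
def countCommonDivisors (ce : String) (b : String) : Int :=
  let cl := ce.toList
  let bl := b.toList
  let n := cl.length
  let m := bl.length
  (List.range' 1 (min n m)).foldl
    (fun ct i =>
      if n % i == 0 && m % i == 0 then
        if cl.take i == bl.take i then
          if check cl i && check bl i then ct + 1 else ct
        else ct
      else ct) 0

-- ===== PORT B =====
-- Euclid loop of Source B: while c: a, c = c, a % c
def pyGcd (a c : Nat) : Nat :=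
  if c = 0 then a else pyGcd c (a % c)
termination_by c
decreasing_by exact Nat.mod_lt _ (by omega)

-- hand port of Python's `s * t` (string repetition) for a nonnegative count t;
-- exact: concatenates t copies of s, as Python does for t >= 0
def pyMul (l : List Char) (t : Nat) : List Char :=
  match t with
  | 0 => []
  | t + 1 => l ++ pyMul l t

-- ok(d) of Source B: ce[:d] == b[:d] and ce[:d]*(n//d) == ce and b[:d]*(m//d) == b
def okB (cl bl : List Char) (n m d : Nat) : Bool :=
  cl.take d == bl.take d && pyMul (cl.take d) (n / d) == cl && pyMul (bl.take d) (m / d) == bl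

-- while d * d <= g loop of Source B
def bLoop (cl bl : List Char) (n m g : Nat) (d : Nat) (ct : Int) : Int :=
  if h : d * d ≤ g then
    let ct1 :=
      if g % d == 0 then
        let ct' := if okB cl bl n m d then ct + 1 else ct
        let e := g / d
        if e ≠ d && okB cl bl n m e then ct' + 1 else ct'
      else ct
    bLoop cl bl n m g (d + 1) ct1
  else ct
termination_by g + 1 - d * d
decreasing_by
  have h2 : d * d + 1 ≤ (d + 1) * (d + 1) := by nlinarith
  omega

def countCommonDivisors_alt (ce : String) (b : String) : Int :=
  let cl := ce.toList
  let bl := b.toList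
  let n := cl.length
  let m := bl.length
  let g := pyGcd n m
  bLoop cl bl n m g 1 0

-- ===== PRECONDITION & SPEC =====
def Spec_countCommonDivisors (ce : String) (b : String) (out : Int) : Prop := out = countCommonDivisors_alt ce b
instance (ce : String) (b : String) (out : Int) : Decidable (Spec_countCommonDivisors ce b out) := by unfold Spec_countCommonDivisors; infer_instance

-- ===== CLAIM (what is proved, stated in full; the proofs are below) =====
def Claim_equal_countCommonDivisors : Prop := ∀ (ce : String) (b : String), Dom_countCommonDivisors ce b → Spec_countCommonDivisors ce b (countCommonDivisors ce b)

-- ===== LEMMAS AND PROOFS =====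

lemma getBang {l : List Char} {i : Nat} (h : i < l.length) : l[i]! = l[i] := by
  rw [List.getElem!_eq_getElem?_getD, List.getElem?_eq_getElem h]; rfl

lemma pyGcd_eq (c a : Nat) : pyGcd a c = Nat.gcd a c := by
  induction c using Nat.strong_induction_on generalizing a with
  | _ c ih =>
    rw [pyGcd]
    split
    · simp_all
    · rw [ih _ (Nat.mod_lt _ (by omega)), Nat.gcd_comm _ (_ % _), ← Nat.gcd_rec, Nat.gcd_comm]

lemma pyMul_length (l : List Char) (t : Nat) : (pyMul l t).length = t * l.length := by
  induction t with
  | zero => simp [pyMul]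
  | succ t ih => simp only [pyMul, List.length_append, ih]; ring

lemma pyMul_getElem! (l : List Char) (t i : Nat) (h : i < t * l.length) :
    (pyMul l t)[i]! = l[i % l.length]! := by
  induction t generalizing i with
  | zero => simp at h
  | succ t ih =>
    simp only [pyMul]
    by_cases hi : i < l.length
    · rw [Nat.mod_eq_of_lt hi, List.getElem!_eq_getElem?_getD, List.getElem!_eq_getElem?_getD,
        List.getElem?_append_left hi]
    · have hl : 0 < l.length := by by_contra h0; simp at h0; simp [h0] at h
      have hsm : (t + 1) * l.length = t * l.length + l.length := by ring
      have h2 : i - l.length < t * l.length := by omega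
      have hidx : (i - l.length) % l.length = i % l.length := by
        conv_rhs => rw [show i = i - l.length + l.length by omega]
        rw [Nat.add_mod_right]
      rw [List.getElem!_eq_getElem?_getD, List.getElem?_append_right (by omega),
        ← List.getElem!_eq_getElem?_getD, ih _ h2, hidx]

lemma checkGo_iff (s : List Char) (k j : Nat) :
    checkGo s k j = true ↔ ∀ i, j ≤ i → i < s.length → s[i]! = s[i % k]! := by
  fun_induction checkGo with
  | case1 j hlt hne =>
    simp only [Bool.false_eq_true, false_iff]
    intro hall
    have hm : j % k < s.length := Nat.lt_of_le_of_lt (Nat.mod_le j k) hlt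
    have := hall j le_rfl hlt
    rw [getBang hlt, getBang hm] at this
    exact hne (by rw [List.getElem?_eq_getElem hlt, List.getElem?_eq_getElem hm, this])
  | case2 j hlt hne ih =>
    rw [ih]
    constructor
    · intro hall i hji hi
      rcases Nat.eq_or_lt_of_le hji with rfl | hlt2
      · have hm : j % k < s.length := Nat.lt_of_le_of_lt (Nat.mod_le j k) hi
        simp only [ne_eq, not_not] at hne
        rw [List.getElem?_eq_getElem hi, List.getElem?_eq_getElem hm] at hne
        rw [getBang hi, getBang hm]; exact Option.some.inj hne
      · exact hall i hlt2 hi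
    · intro hall i hji hi; exact hall i (by omega) hi
  | case3 j hge =>
    simp only [true_iff]
    intro i hji hi; omega

lemma check_iff (s : List Char) (k : Nat) :
    check s k = true ↔ ∀ i, i < s.length → s[i]! = s[i % k]! := by
  rw [check, checkGo_iff]
  exact ⟨fun h i hi => h i (Nat.zero_le i) hi, fun h i _ hi => h i hi⟩

lemma take_getElem! (l : List Char) (k j : Nat) (hj : j < k) (hjl : j < l.length) :
    (l.take k)[j]! = l[j]! := by
  rw [getBang (by simp; omega), getBang hjl, List.getElem_take]

lemma check_eq_pyMul (l : List Char) (k : Nat) (hk : 1 ≤ k) (hdvd : k ∣ l.length) :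
    (check l k = true) ↔ pyMul (l.take k) (l.length / k) = l := by
  rcases Nat.eq_zero_or_pos l.length with h0 | hpos
  · have : l = [] := List.eq_nil_of_length_eq_zero h0
    subst this
    simp [check_iff, pyMul, Nat.div_eq_of_lt, h0]
  · have hkn : k ≤ l.length := Nat.le_of_dvd hpos hdvd
    have hrl : (l.take k).length = k := by simp; omega
    have hlen : l.length / k * k = l.length := Nat.div_mul_cancel hdvd
    rw [check_iff]
    constructor
    · intro hall
      apply List.ext_getElem
      · rw [pyMul_length, hrl]; omega
      · intro i h1 h2
        rw [← getBang h1, ← getBang h2, pyMul_getElem! _ _ _ (by rw [hrl]; omega), hrl]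
        have hm : i % k < k := Nat.mod_lt _ (by omega)
        rw [take_getElem! _ _ _ hm (by omega)]
        exact (hall i h2).symm
    · intro heq i hi
      have hm : i % k < k := Nat.mod_lt _ (by omega)
      conv_lhs => rw [← heq]
      rw [pyMul_getElem! _ _ _ (by rw [hrl]; omega), hrl, take_getElem! _ _ _ hm (by omega)]

lemma sets_eq (cl bl : List Char) :
    ((Finset.Ico 1 (min cl.length bl.length + 1)).filter
        (fun i => ((cl.length % i == 0 && bl.length % i == 0) &&
          ((cl.take i == bl.take i) && (check cl i && check bl i))) = true))
      = (Nat.gcd cl.length bl.length).divisors.filter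
          (fun e => okB cl bl cl.length bl.length e = true) := by
  ext i
  set n := cl.length with hn
  set m := bl.length with hm
  simp only [Finset.mem_filter, Finset.mem_Ico, Nat.mem_divisors, okB, Bool.and_eq_true,
    beq_iff_eq]
  constructor
  · rintro ⟨⟨h1, h2⟩, ⟨hdn, hdm⟩, hpre, hc1, hc2⟩
    have hdn' : i ∣ n := Nat.dvd_of_mod_eq_zero hdn
    have hdm' : i ∣ m := Nat.dvd_of_mod_eq_zero hdm
    have hg : i ∣ Nat.gcd n m := Nat.dvd_gcd hdn' hdm'
    have hgne : Nat.gcd n m ≠ 0 := by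
      intro h0
      have := Nat.eq_zero_of_gcd_eq_zero_left h0
      have := Nat.eq_zero_of_gcd_eq_zero_right h0
      omega
    refine ⟨⟨hg, hgne⟩, ⟨hpre, ?_⟩, ?_⟩
    · exact (check_eq_pyMul cl i h1 hdn').mp hc1
    · exact (check_eq_pyMul bl i h1 hdm').mp hc2
  · rintro ⟨⟨hg, hgne⟩, ⟨hpre, hc1⟩, hc2⟩
    have hdn' : i ∣ n := hg.trans (Nat.gcd_dvd_left n m)
    have hdm' : i ∣ m := hg.trans (Nat.gcd_dvd_right n m)
    have hipos : 1 ≤ i := by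
      rcases Nat.eq_zero_or_pos i with rfl | h
      · exact absurd (Nat.eq_zero_of_zero_dvd hg) hgne
      · exact h
    have hnpos : 0 < n := by
      rcases Nat.eq_zero_or_pos n with h0 | h; swap; · exact h
      exfalso
      have hmpos : 0 < m := by
        rcases Nat.eq_zero_or_pos m with hm0 | h
        · exact absurd (by simp [h0, hm0]) hgne
        · exact h
      have : cl = [] := by rw [← List.length_eq_zero_iff, ← hn]; omega
      rw [this] at hpre
      simp at hpre
      rcases hpre with h | h
      all_goals first
        | omega
        | (rw [h] at hm; simp at hm; omega)
    have hmpos : 0 < m := by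
      rcases Nat.eq_zero_or_pos m with h0 | h; swap; · exact h
      exfalso
      have : bl = [] := by rw [← List.length_eq_zero_iff, ← hm]; omega
      rw [this] at hpre
      simp at hpre
      rcases hpre with h | h
      all_goals first
        | omega
        | (rw [h] at hn; simp at hn; omega)
    have hile : i ≤ Nat.gcd n m := Nat.le_of_dvd (by omega) hg
    have hgle1 : Nat.gcd n m ≤ n := Nat.le_of_dvd hnpos (Nat.gcd_dvd_left n m)
    have hgle2 : Nat.gcd n m ≤ m := Nat.le_of_dvd hmpos (Nat.gcd_dvd_right n m)
    refine ⟨⟨hipos, by omega⟩, ⟨?_, ?_⟩, hpre, ?_, ?_⟩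
    · exact Nat.mod_eq_zero_of_dvd hdn'
    · exact Nat.mod_eq_zero_of_dvd hdm'
    · exact (check_eq_pyMul cl i hipos hdn').mpr hc1
    · exact (check_eq_pyMul bl i hipos hdm').mpr hc2

lemma div_mem_split (g d e : Nat) (h1 : 1 ≤ d) (h2 : d * d ≤ g) (hg0 : g ≠ 0) (he : e ∣ g) :
    (d ≤ e ∧ d ≤ g / e) ↔
      ((e = d ∧ d ∣ g) ∨ (e = g / d ∧ d ∣ g) ∨ (d + 1 ≤ e ∧ d + 1 ≤ g / e)) := by
  have hepos : 0 < e := Nat.pos_of_dvd_of_pos he (by omega)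
  have hcancel : e * (g / e) = g := Nat.mul_div_cancel' he
  constructor
  · rintro ⟨hde, hdg⟩
    by_cases hed : e = d
    · exact Or.inl ⟨hed, hed ▸ he⟩
    · by_cases hged : g / e = d
      · have hdvd : d ∣ g := hged ▸ Nat.div_dvd_of_dvd he
        have : g / d = e := by
          rw [← hged, Nat.div_div_self he hg0]
        exact Or.inr (Or.inl ⟨this.symm, hdvd⟩)
      · exact Or.inr (Or.inr ⟨by omega, by omega⟩)
  · have hdg : d ≤ g / d := (Nat.le_div_iff_mul_le (by omega)).mpr h2
    rintro (⟨rfl, hdvd⟩ | ⟨rfl, hdvd⟩ | ⟨hde, hdg'⟩)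
    · exact ⟨le_rfl, hdg⟩
    · exact ⟨hdg, by rw [Nat.div_div_self hdvd hg0]⟩
    · exact ⟨by omega, by omega⟩

lemma sqrt_step (F : Nat → Bool) (g d : Nat) (h1 : 1 ≤ d) (h2 : d * d ≤ g) :
    (g.divisors.filter (fun e => F e = true ∧ d ≤ e ∧ d ≤ g / e)).card =
      ((if g % d = 0 then
          (if F d = true then 1 else 0) +
          (if g / d ≠ d ∧ F (g / d) = true then 1 else 0)
        else 0) : Nat) +
      (g.divisors.filter (fun e => F e = true ∧ d + 1 ≤ e ∧ d + 1 ≤ g / e)).card := by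
  have hg0 : g ≠ 0 := by
    intro h; rw [h] at h2; have := Nat.le_zero.mp h2; nlinarith
  by_cases hdvd : d ∣ g
  swap
  · rw [if_neg (fun h => hdvd (Nat.dvd_of_mod_eq_zero h)), Nat.zero_add]
    congr 1
    apply Finset.filter_congr
    intro e hee
    have he := (Nat.mem_divisors.mp hee).1
    rw [div_mem_split g d e h1 h2 hg0 he]
    constructor
    · rintro ⟨hF, (⟨-, h⟩ | ⟨-, h⟩ | h)⟩
      · exact absurd h hdvd
      · exact absurd h hdvd
      · exact ⟨hF, h⟩
    · rintro ⟨hF, h⟩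
      exact ⟨hF, Or.inr (Or.inr h)⟩
  · rw [if_pos (Nat.mod_eq_zero_of_dvd hdvd)]
    have hmemd : d ∈ g.divisors := Nat.mem_divisors.mpr ⟨hdvd, hg0⟩
    have hmemgd : g / d ∈ g.divisors := Nat.mem_divisors.mpr ⟨Nat.div_dvd_of_dvd hdvd, hg0⟩
    have hdg : d ≤ g / d := (Nat.le_div_iff_mul_le (by omega)).mpr h2
    have hgdd : g / (g / d) = d := Nat.div_div_self hdvd hg0
    have hdnotS : d ∉ g.divisors.filter (fun e => F e = true ∧ d + 1 ≤ e ∧ d + 1 ≤ g / e) := by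
      simp only [Finset.mem_filter]; rintro ⟨-, -, h, -⟩; omega
    have hgdnotS : g / d ∉ g.divisors.filter (fun e => F e = true ∧ d + 1 ≤ e ∧ d + 1 ≤ g / e) := by
      simp only [Finset.mem_filter]; rintro ⟨-, -, -, h⟩; rw [hgdd] at h; omega
    by_cases heq : g / d = d
    · rw [show (if g / d ≠ d ∧ F (g / d) = true then 1 else 0) = 0 from
        if_neg (fun hc => hc.1 heq)]
      have hset : g.divisors.filter (fun e => F e = true ∧ d ≤ e ∧ d ≤ g / e) =
          (if F d = true then {d} else ∅) ∪
            g.divisors.filter (fun e => F e = true ∧ d + 1 ≤ e ∧ d + 1 ≤ g / e) := by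
        ext e
        simp only [Finset.mem_union, Finset.mem_filter]
        constructor
        · rintro ⟨hee, hF, hrest⟩
          rcases (div_mem_split g d e h1 h2 hg0 (Nat.mem_divisors.mp hee).1).mp hrest with
            ⟨rfl, -⟩ | ⟨rfl, -⟩ | h
          · left; rw [if_pos hF]; exact Finset.mem_singleton_self _
          · left; rw [heq] at hF ⊢; rw [if_pos hF]; exact Finset.mem_singleton_self _
          · right; exact ⟨hee, hF, h⟩
        · rintro (hmem | ⟨hee, hF, hrest⟩)
          · have : e = d ∧ F d = true := by
              by_cases hFd : F d = true
              · rw [if_pos hFd] at hmem; exact ⟨Finset.mem_singleton.mp hmem, hFd⟩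
              · rw [if_neg hFd] at hmem; exact absurd hmem (Finset.notMem_empty e)
            rcases this with ⟨rfl, hFd⟩
            exact ⟨hmemd, hFd, le_rfl, hdg⟩
          · exact ⟨hee, hF, by omega, by
              have := (div_mem_split g d e h1 h2 hg0 (Nat.mem_divisors.mp hee).1).mpr
                (Or.inr (Or.inr hrest))
              exact this.2⟩
      rw [hset]
      have hdisjA : Disjoint (if F d = true then ({d} : Finset ℕ) else ∅)
          (g.divisors.filter (fun e => F e = true ∧ d + 1 ≤ e ∧ d + 1 ≤ g / e)) := by
        split_ifs
        · simpa using hdnotS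
        · simp
      rw [Finset.card_union_of_disjoint hdisjA]
      split_ifs <;> simp <;> try omega
    · have hset : g.divisors.filter (fun e => F e = true ∧ d ≤ e ∧ d ≤ g / e) =
          (if F d = true then {d} else ∅) ∪
            ((if F (g / d) = true then {g / d} else ∅) ∪
              g.divisors.filter (fun e => F e = true ∧ d + 1 ≤ e ∧ d + 1 ≤ g / e)) := by
        ext e
        simp only [Finset.mem_union, Finset.mem_filter]
        constructor
        · rintro ⟨hee, hF, hrest⟩
          rcases (div_mem_split g d e h1 h2 hg0 (Nat.mem_divisors.mp hee).1).mp hrest with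
            ⟨rfl, -⟩ | ⟨rfl, -⟩ | h
          · left; rw [if_pos hF]; exact Finset.mem_singleton_self _
          · right; left; rw [if_pos hF]; exact Finset.mem_singleton_self _
          · right; right; exact ⟨hee, hF, h⟩
        · rintro (hmem | hmem | ⟨hee, hF, hrest⟩)
          · have : e = d ∧ F d = true := by
              by_cases hFd : F d = true
              · rw [if_pos hFd] at hmem; exact ⟨Finset.mem_singleton.mp hmem, hFd⟩
              · rw [if_neg hFd] at hmem; exact absurd hmem (Finset.notMem_empty e)
            rcases this with ⟨rfl, hFd⟩
            exact ⟨hmemd, hFd, le_rfl, hdg⟩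
          · have : e = g / d ∧ F (g / d) = true := by
              by_cases hFgd : F (g / d) = true
              · rw [if_pos hFgd] at hmem; exact ⟨Finset.mem_singleton.mp hmem, hFgd⟩
              · rw [if_neg hFgd] at hmem; exact absurd hmem (Finset.notMem_empty e)
            rcases this with ⟨rfl, hFgd⟩
            exact ⟨hmemgd, hFgd, hdg, by rw [hgdd]⟩
          · exact ⟨hee, hF, by omega, by
              have := (div_mem_split g d e h1 h2 hg0 (Nat.mem_divisors.mp hee).1).mpr
                (Or.inr (Or.inr hrest))
              exact this.2⟩
      have hdisjB : Disjoint (if F (g / d) = true then ({g / d} : Finset ℕ) else ∅)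
          (g.divisors.filter (fun e => F e = true ∧ d + 1 ≤ e ∧ d + 1 ≤ g / e)) := by
        split_ifs
        · simpa using hgdnotS
        · simp
      have hdisjA : Disjoint (if F d = true then ({d} : Finset ℕ) else ∅)
          ((if F (g / d) = true then ({g / d} : Finset ℕ) else ∅) ∪
            g.divisors.filter (fun e => F e = true ∧ d + 1 ≤ e ∧ d + 1 ≤ g / e)) := by
        have hne : d ≠ g / d := fun h => heq h.symm
        split_ifs <;>
          simp_all [Finset.disjoint_union_right, Finset.disjoint_singleton_left]
      rw [hset, Finset.card_union_of_disjoint hdisjA, Finset.card_union_of_disjoint hdisjB]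
      split_ifs with hFd hc hc <;> simp_all <;> try omega

lemma sqrt_empty (F : Nat → Bool) (g d : Nat) (h : g < d * d) :
    g.divisors.filter (fun e => F e = true ∧ d ≤ e ∧ d ≤ g / e) = ∅ := by
  rw [Finset.filter_eq_empty_iff]
  intro e hee
  rintro ⟨-, he1, he2⟩
  have hdvd := (Nat.mem_divisors.mp hee).1
  have hc : e * (g / e) = g := Nat.mul_div_cancel' hdvd
  have := Nat.mul_le_mul he1 he2
  omega

lemma bLoop_count (cl bl : List Char) (n m g : Nat) :
    ∀ fuel d ct, g + 1 - d * d ≤ fuel → 1 ≤ d →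
      bLoop cl bl n m g d ct = ct +
        ((g.divisors.filter
            (fun e => okB cl bl n m e = true ∧ d ≤ e ∧ d ≤ g / e)).card : Int) := by
  intro fuel
  induction fuel with
  | zero =>
    intro d ct hfuel hd
    have hlt : g < d * d := by omega
    rw [bLoop, dif_neg (by omega), sqrt_empty _ _ _ hlt]
    simp
  | succ fuel ih =>
    intro d ct hfuel hd
    rw [bLoop]
    by_cases h : d * d ≤ g
    · rw [dif_pos h]
      have hstep := sqrt_step (fun e => okB cl bl n m e) g d hd h
      have hsq : d * d + 1 ≤ (d + 1) * (d + 1) := by nlinarith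
      rw [ih (d + 1) _ (by omega) (by omega)]
      simp only at hstep
      rw [hstep]
      simp only [beq_iff_eq, Bool.and_eq_true, bne_iff_ne, decide_eq_true_eq, ne_eq]
      split_ifs <;> push_cast <;> try ring
      all_goals (exfalso; tauto)
    · rw [dif_neg h, sqrt_empty _ _ _ (by omega)]
      simp

lemma body_collapse (c1 c2 c3 : Bool) (ct : Int) :
    (if c1 then if c2 then if c3 then ct + 1 else ct else ct else ct)
      = if c1 && (c2 && c3) then ct + 1 else ct := by
  cases c1 <;> cases c2 <;> cases c3 <;> simp

lemma foldl_count (p : Nat → Bool) (L : List Nat) (c : Int) :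
    L.foldl (fun ct i => if p i then ct + 1 else ct) c = c + (L.countP p : Int) := by
  induction L generalizing c with
  | nil => simp
  | cons x xs ih =>
    simp only [List.foldl_cons, List.countP_cons, ih]
    by_cases h : p x <;> simp [h] <;> push_cast <;> ring

lemma countP_range' (p : Nat → Bool) (M : Nat) :
    (List.range' 1 M).countP p = ((Finset.Ico 1 (M + 1)).filter (fun i => p i = true)).card := by
  induction M with
  | zero => simp
  | succ M ih =>
    rw [List.range'_concat, List.countP_append, ih,
        show (1 + 1 * M) = M + 1 by omega,
        show Finset.Ico 1 (M + 1 + 1) = insert (M + 1) (Finset.Ico 1 (M + 1)) from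
          Nat.Ico_succ_right_eq_insert_Ico (by omega),
        Finset.filter_insert]
    by_cases h : p (M + 1) = true
    · rw [if_pos h, Finset.card_insert_of_notMem (by simp)]
      simp [List.countP_cons, h]
    · rw [if_neg h]
      simp [List.countP_cons, h]

lemma filter_one_le (g : Nat) (F : Nat → Bool) :
    g.divisors.filter (fun e => F e = true ∧ 1 ≤ e ∧ 1 ≤ g / e)
      = g.divisors.filter (fun e => F e = true) := by
  apply Finset.filter_congr
  intro e he
  obtain ⟨hd, hg0⟩ := Nat.mem_divisors.mp he
  have hp : 0 < e := Nat.pos_of_dvd_of_pos hd (Nat.pos_of_ne_zero hg0)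
  have hq : 0 < g / e := Nat.div_pos (Nat.le_of_dvd (Nat.pos_of_ne_zero hg0) hd) hp
  constructor
  · rintro ⟨h, -, -⟩; exact h
  · intro h; exact ⟨h, hp, hq⟩

theorem mainList (cl bl : List Char) :
    (List.range' 1 (min cl.length bl.length)).foldl
      (fun ct i =>
        if cl.length % i == 0 && bl.length % i == 0 then
          if cl.take i == bl.take i then
            if check cl i && check bl i then ct + 1 else ct
          else ct
        else ct) 0
    = bLoop cl bl cl.length bl.length (pyGcd cl.length bl.length) 1 0 := by
  have hbody : (fun (ct : Int) (i : Nat) =>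
      if cl.length % i == 0 && bl.length % i == 0 then
        if cl.take i == bl.take i then
          if check cl i && check bl i then ct + 1 else ct
        else ct
      else ct) =
      (fun (ct : Int) (i : Nat) =>
        if (cl.length % i == 0 && bl.length % i == 0) &&
            ((cl.take i == bl.take i) && (check cl i && check bl i))
        then ct + 1 else ct) :=
    funext fun ct => funext fun i => body_collapse _ _ _ ct
  rw [hbody, foldl_count, countP_range', sets_eq, pyGcd_eq, ← filter_one_le,
    bLoop_count cl bl cl.length bl.length (Nat.gcd cl.length bl.length)
      (Nat.gcd cl.length bl.length + 1) 1 0 (by omega) le_rfl]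

-- ===== VERDICT (by name: the statement is the Claim_ definition above) =====
theorem countCommonDivisors_spec : Claim_equal_countCommonDivisors := by
  intro ce b _
  unfold Spec_countCommonDivisors countCommonDivisors countCommonDivisors_alt
  exact mainList ce.toList b.toList
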